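-- pv_equiv track=rewrite | github.com/paiml/depyler | examples/hard_data_structures.py | trie_operations
-- ===== SOURCE A (Python) =====
-- def trie_operations(words: list[str]) -> int:
--     """Simulate trie insert and prefix search using nested dicts.
--
--     Uses dict[str, dict] pattern to build a trie-like structure.
--     Since we cannot have recursive types, we flatten to string keys.
--     Returns count of words that share a common prefix.
--     """
--     # Build prefix count map
--     prefix_counts: dict[str, int] = {}
--     for word in words:
--         for end in range(1, len(word) + 1):
--             prefix: str = word[:end]
--             if prefix in prefix_counts:
--                 prefix_counts[prefix] += 1
--             else:
--                 prefix_counts[prefix] = 1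
--
--     # Count prefixes shared by more than one word
--     shared: int = 0
--     for prefix in prefix_counts:
--         if prefix_counts[prefix] > 1:
--             shared += 1
--     return shared
-- ===== SOURCE B (Python) =====
-- def trie_operations(words: list[str]) -> int:
--     """Count prefixes shared by more than one word via a real trie.
--
--     Each trie node is [count, children]; inserting a word walks it
--     char by char incrementing counts; no prefix string is materialised.
--     """
--     root: dict = {}
--     for word in words:
--         node = root
--         for ch in word:
--             entry = node.get(ch)
--             if entry is None:
--                 entry = [0, {}]
--                 node[ch] = entry
--             entry[0] += 1
--             node = entry[1]
--
--     def count_shared(children: dict) -> int: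
--         s = 0
--         for cnt, child in children.values():
--             if cnt > 1:
--                 s += 1
--             s += count_shared(child)
--         return s
--
--     return count_shared(root)
-- ===== Notes on version B (the rewrite author's own statement) =====
-- stated objective: alternative
-- what changed: Replaces the dict of all materialised prefix strings with a character trie whose node counts are incremented in one char-by-char walk per word, then counts nodes with count>1 by a tree traversal.
import Mathlib
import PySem

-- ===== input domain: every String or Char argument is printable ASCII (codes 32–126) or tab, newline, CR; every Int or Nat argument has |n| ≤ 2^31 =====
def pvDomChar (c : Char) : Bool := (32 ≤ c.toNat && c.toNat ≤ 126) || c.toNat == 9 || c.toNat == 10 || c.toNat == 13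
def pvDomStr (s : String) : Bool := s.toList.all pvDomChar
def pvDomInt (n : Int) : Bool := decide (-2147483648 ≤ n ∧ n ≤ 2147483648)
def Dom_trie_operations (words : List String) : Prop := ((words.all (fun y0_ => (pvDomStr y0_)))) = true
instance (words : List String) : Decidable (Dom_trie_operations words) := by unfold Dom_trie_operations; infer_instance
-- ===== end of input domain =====

-- B replaces A's dict of every materialised prefix string with a character trie
-- (counts incremented in one char-by-char walk per word); objective: alternative algorithm.

-- ===== PORT A =====
def trie_operations (words : List String) : Int :=
  let pc : PySem.Dict String Int :=
    words.foldl (fun d w =>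
      (PySem.List.pyRange 1 (PySem.Str.len w + 1) 1).foldl (fun d e =>
        let p := PySem.Str.slice w none (some e)
        if d.contains p then d.insert p (d.getD p 0 + 1) else d.insert p 1) d)
      PySem.Dict.empty
  pc.keys.foldl (fun s p => if 1 < pc.getD p 0 then s + 1 else s) 0

-- ===== PORT B =====
-- Source B's nested dicts dict[char, [count, children]] are a trie; Lean forbids the
-- nested inductive 'node : List (Char × Int × Trie) → Trie', so the children dict
-- (an ordered association list) is encoded first-child/next-sibling: `node c n ch sib`
-- is the entry (c ↦ [n, ch]) followed by the remaining entries `sib` of the same dict.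
inductive Trie where
  | nil : Trie
  | node : Char → Int → Trie → Trie → Trie
deriving DecidableEq, Repr

-- the inner 'for ch in word' walk of Source B: find/create the entry for the char,
-- increment its count, recurse into its child dict with the rest of the word
def insChars : Trie → List Char → Trie
  | t, [] => t
  | Trie.nil, c :: cs => Trie.node c 1 (insChars Trie.nil cs) Trie.nil
  | Trie.node c' n ch sib, c :: cs =>
    if c' = c then Trie.node c' (n + 1) (insChars ch cs) sib
    else Trie.node c' n ch (insChars sib (c :: cs))
termination_by t cs => (cs.length, sizeOf t)

-- Source B's count_shared: sum over all entries of all children dicts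
def countShared : Trie → Int
  | Trie.nil => 0
  | Trie.node _ n ch sib => (if 1 < n then 1 else 0) + countShared ch + countShared sib

def trie_operations_alt (words : List String) : Int :=
  countShared (words.foldl (fun t w => insChars t w.toList) Trie.nil)

-- ===== PRECONDITION & SPEC =====
def Spec_trie_operations (words : List String) (out : Int) : Prop := out = trie_operations_alt words
instance (words : List String) (out : Int) : Decidable (Spec_trie_operations words out) := by unfold Spec_trie_operations; infer_instance

-- ===== CLAIM (what is proved, stated in full; the proofs are below) =====
def Claim_equal_trie_operations : Prop := ∀ (words : List String), Dom_trie_operations words → Spec_trie_operations words (trie_operations words)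

-- ===== LEMMAS AND PROOFS =====

-- the nonempty prefixes of a word, as char lists
def prefC (cs : List Char) : List (List Char) := (List.range cs.length).map (fun k => cs.take (k + 1))

-- the stored count of the trie node reached along path p (none: no such node)
def nodeCnt? : Trie → List Char → Option Int
  | Trie.nil, _ => none
  | Trie.node _ _ _ _, [] => none
  | Trie.node c n ch sib, q :: qs =>
    if q = c then (if qs = [] then some n else nodeCnt? ch qs)
    else nodeCnt? sib (q :: qs)

-- chars of the entries of one children dict (the sibling chain)
def rootChars : Trie → List Char
  | Trie.nil => []
  | Trie.node c _ _ sib => c :: rootChars sib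

-- well-formedness: entry chars are distinct in every children dict
def WF : Trie → Prop
  | Trie.nil => True
  | Trie.node c _ ch sib => c ∉ rootChars sib ∧ WF ch ∧ WF sib

-- all (path, count) pairs of a trie
def itemsT : Trie → List (List Char × Int)
  | Trie.nil => []
  | Trie.node c n ch sib =>
    ([c], n) :: ((itemsT ch).map (fun pn => (c :: pn.1, pn.2)) ++ itemsT sib)

lemma countShared_eq_countP (t : Trie) :
    countShared t = ((itemsT t).countP (fun pn => 1 < pn.2) : Int) := by
  induction t with
  | nil => simp [countShared, itemsT]
  | node c n ch sib ih1 ih2 =>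
    simp only [countShared, itemsT, List.countP_cons, List.countP_append, List.countP_map,
      Function.comp_def, ih1, ih2]
    by_cases h : 1 < n <;> simp [h] <;> ring

lemma itemsT_head_mem_rootChars (t : Trie) {p : List Char} {n : Int}
    (h : (p, n) ∈ itemsT t) : ∃ q qs, p = q :: qs ∧ q ∈ rootChars t := by
  induction t generalizing p n with
  | nil => simp [itemsT] at h
  | node c m ch sib ih1 ih2 =>
    simp only [itemsT, List.mem_cons, List.mem_append, List.mem_map] at h
    rcases h with h | ⟨⟨p', n'⟩, _, h⟩ | h
    · exact ⟨c, [], (Prod.ext_iff.mp h).1, by simp [rootChars]⟩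
    · exact ⟨c, p', ((Prod.ext_iff.mp h).1).symm, by simp [rootChars]⟩
    · obtain ⟨q, qs, rfl, hq⟩ := ih2 h
      exact ⟨q, qs, rfl, by simp [rootChars, hq]⟩

lemma mem_itemsT_iff {t : Trie} (hwf : WF t) {p : List Char} {n : Int} :
    (p, n) ∈ itemsT t ↔ nodeCnt? t p = some n := by
  induction t generalizing p n with
  | nil => simp [itemsT, nodeCnt?]
  | node c m ch sib ih1 ih2 =>
    obtain ⟨hroot, hwfch, hwfsib⟩ := hwf
    constructor
    · intro h
      simp only [itemsT, List.mem_cons, List.mem_append, List.mem_map] at h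
      rcases h with h | ⟨⟨p', n'⟩, hm, he⟩ | h
      · obtain ⟨rfl, rfl⟩ := Prod.mk.injEq .. ▸ Prod.ext_iff.mp h
        simp [nodeCnt?]
      · obtain ⟨he1, he2⟩ := Prod.ext_iff.mp he
        subst he1; subst he2
        obtain ⟨q', qs', rfl, -⟩ := itemsT_head_mem_rootChars ch hm
        simpa [nodeCnt?] using (ih1 hwfch).mp hm
      · obtain ⟨q, qs, rfl, hq⟩ := itemsT_head_mem_rootChars sib h
        have hqc : q ≠ c := fun hqc => hroot (hqc ▸ hq)
        simpa [nodeCnt?, hqc] using (ih2 hwfsib).mp h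
    · intro h
      match p with
      | [] => simp [nodeCnt?] at h
      | q :: qs =>
        by_cases hq : q = c
        · subst hq
          by_cases hqs : qs = []
          · subst hqs
            simp only [nodeCnt?, reduceIte, Option.some.injEq] at h
            simp [itemsT, h]
          · simp only [nodeCnt?, hqs, reduceIte] at h
            have := (ih1 hwfch).mpr h
            simp only [itemsT, List.mem_cons, List.mem_append, List.mem_map]
            exact Or.inr (Or.inl ⟨(qs, n), this, rfl⟩)
        · simp only [nodeCnt?, hq, reduceIte] at h
          have := (ih2 hwfsib).mpr h
          simp only [itemsT, List.mem_cons, List.mem_append]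
          exact Or.inr (Or.inr this)

lemma nodup_keys_itemsT {t : Trie} (hwf : WF t) : ((itemsT t).map (·.1)).Nodup := by
  induction t with
  | nil => simp [itemsT]
  | node c m ch sib ih1 ih2 =>
    obtain ⟨hroot, hwfch, hwfsib⟩ := hwf
    simp only [itemsT, List.map_cons, List.map_append, List.map_map, List.nodup_cons]
    refine ⟨?_, List.Nodup.append ?_ (ih2 hwfsib) ?_⟩
    · intro hmem
      rcases List.mem_append.mp hmem with h | h
      · obtain ⟨⟨p', n'⟩, hm, he⟩ := List.mem_map.mp h
        obtain ⟨q', qs', rfl, -⟩ := itemsT_head_mem_rootChars ch hm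
        simp at he
      · obtain ⟨⟨p', n'⟩, hm, he⟩ := List.mem_map.mp h
        obtain ⟨q', qs', rfl, hq⟩ := itemsT_head_mem_rootChars sib hm
        simp only at he
        obtain ⟨rfl, -⟩ := List.cons_eq_cons.mp he.symm
        exact hroot hq
    · have : ((itemsT ch).map (fun pn => ((c :: pn.1, pn.2) : List Char × Int))).map (·.1)
          = ((itemsT ch).map (·.1)).map (c :: ·) := by
        simp [List.map_map, Function.comp_def]
      have h2 := (ih1 hwfch).map (fun a b (hab : c :: a = c :: b) => (List.cons_eq_cons.mp hab).2)
      simpa [List.map_map, Function.comp_def] using h2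
    · intro x hx hy
      obtain ⟨⟨p', n'⟩, hm, he⟩ := List.mem_map.mp hx
      obtain ⟨⟨p'', n''⟩, hm', he'⟩ := List.mem_map.mp hy
      obtain ⟨q'', qs'', rfl, hq⟩ := itemsT_head_mem_rootChars sib hm'
      simp only at he he'
      rw [← he'] at he
      obtain ⟨rfl, -⟩ := List.cons_eq_cons.mp he
      exact hroot hq

lemma nodeCnt?_insChars (cs : List Char) : ∀ (t : Trie) (p : List Char),
    nodeCnt? (insChars t cs) p =
      if p ≠ [] ∧ p <+: cs then some ((nodeCnt? t p).getD 0 + 1) else nodeCnt? t p := by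
  induction cs with
  | nil =>
    intro t p
    have hno : ¬ (p ≠ [] ∧ p <+: ([] : List Char)) := by
      rintro ⟨h1, h2⟩; exact h1 (List.prefix_nil.mp h2)
    rw [if_neg hno]; cases t <;> simp [insChars]
  | cons c rest ih =>
    intro t
    induction t with
    | nil =>
      intro p
      match p with
      | [] => simp [insChars, nodeCnt?]
      | q :: qs =>
        by_cases hq : q = c
        · subst hq
          match qs with
          | [] => simp [insChars, nodeCnt?]
          | r :: rs =>
            simp [insChars, nodeCnt?, ih, List.cons_prefix_cons]
        · simp [insChars, nodeCnt?, hq, List.cons_prefix_cons]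
    | node c' m ch sib ihch ihsib =>
      intro p
      by_cases hc : c' = c
      · subst hc
        match p with
        | [] => simp [insChars, nodeCnt?]
        | q :: qs =>
          by_cases hq : q = c'
          · subst hq
            match qs with
            | [] => simp [insChars, nodeCnt?]
            | r :: rs =>
              simp [insChars, nodeCnt?, ih, List.cons_prefix_cons]
          · simp [insChars, nodeCnt?, hq, List.cons_prefix_cons]
      · match p with
        | [] => simp [insChars, nodeCnt?, hc]
        | q :: qs =>
          by_cases hq : q = c'
          · subst hq
            simp [insChars, nodeCnt?, hc, List.cons_prefix_cons]
          · simp only [insChars, hc, reduceIte, nodeCnt?, hq, ihsib (q :: qs)]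

lemma rootChars_insChars (c : Char) (cs : List Char) (t : Trie) :
    rootChars (insChars t (c :: cs)) =
      if c ∈ rootChars t then rootChars t else rootChars t ++ [c] := by
  induction t with
  | nil => simp [insChars, rootChars]
  | node c' m ch sib ihch ihsib =>
    by_cases hc : c' = c
    · subst hc
      simp [insChars, rootChars]
    · have hc' : ¬ c = c' := fun h => hc h.symm
      by_cases hm : c ∈ rootChars sib <;>
        simp [insChars, rootChars, hc, hc', ihsib, hm, List.mem_cons]

lemma wf_insChars (cs : List Char) : ∀ (t : Trie), WF t → WF (insChars t cs) := by
  induction cs with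
  | nil => intro t h; cases t <;> simpa [insChars]
  | cons c rest ih =>
    intro t
    induction t with
    | nil => intro _; simp only [insChars]; exact ⟨by simp [rootChars], ih Trie.nil trivial, trivial⟩
    | node c' m ch sib ihch ihsib =>
      rintro ⟨h1, h2, h3⟩
      by_cases hc : c' = c
      · subst hc
        simp only [insChars, reduceIte]
        exact ⟨h1, ih ch h2, h3⟩
      · simp only [insChars, hc, reduceIte]
        refine ⟨?_, h2, ihsib h3⟩
        rw [rootChars_insChars]
        by_cases hm : c ∈ rootChars sib
        · simpa [hm] using h1
        · simp only [hm, reduceIte, List.mem_append, List.mem_singleton]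
          rintro (h | h)
          · exact h1 h
          · exact hc h

lemma prefC_nodup (w : List Char) : (prefC w).Nodup := by
  apply List.Nodup.of_map List.length
  have h : (prefC w).map List.length = (List.range w.length).map (fun k => k + 1) := by
    simp only [prefC, List.map_map]
    refine List.map_congr_left (fun k hk => ?_)
    rw [List.mem_range] at hk
    simp only [Function.comp_def, List.length_take]
    omega
  rw [h]
  exact List.nodup_range.map (fun a b hab => by omega)

lemma mem_prefC (w p : List Char) : p ∈ prefC w ↔ p ≠ [] ∧ p <+: w := by
  constructor
  · intro hm
    obtain ⟨k, hk, rfl⟩ := List.mem_map.mp hm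
    rw [List.mem_range] at hk
    refine ⟨?_, List.take_prefix _ _⟩
    have : (w.take (k + 1)).length = k + 1 := by simp; omega
    intro hnil
    rw [hnil] at this
    simp at this
  · rintro ⟨h1, h2⟩
    have hle : p.length ≤ w.length := h2.length_le
    have hpos : 0 < p.length := List.length_pos_iff.mpr h1
    refine List.mem_map.mpr ⟨p.length - 1, List.mem_range.mpr (by omega), ?_⟩
    have : p.length - 1 + 1 = p.length := by omega
    rw [this, ← List.prefix_iff_eq_take.mp h2]

lemma count_prefC (w p : List Char) :
    (prefC w).count p = if p ≠ [] ∧ p <+: w then 1 else 0 := by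
  by_cases h : p ≠ [] ∧ p <+: w
  · rw [if_pos h]
    exact List.count_eq_one_of_mem (prefC_nodup w) ((mem_prefC w p).mpr h)
  · rw [if_neg h, List.count_eq_zero]
    intro hm
    exact h ((mem_prefC w p).mp hm)

lemma nodeCnt?_build (ws : List (List Char)) : ∀ (t : Trie) (L : List (List Char)),
    (∀ p, nodeCnt? t p =
      if p ≠ [] ∧ 0 < L.count p then some ((L.count p : Int)) else none) →
    ∀ p, nodeCnt? (ws.foldl insChars t) p =
      if p ≠ [] ∧ 0 < (L ++ ws.flatMap prefC).count p
      then some (((L ++ ws.flatMap prefC).count p : Int)) else none := by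
  induction ws with
  | nil => intro t L h p; simpa using h p
  | cons w ws ih =>
    intro t L h p
    have step : ∀ q, nodeCnt? (insChars t w) q =
        if q ≠ [] ∧ 0 < (L ++ prefC w).count q
        then some (((L ++ prefC w).count q : Int)) else none := by
      intro q
      rw [nodeCnt?_insChars, h q, List.count_append, count_prefC]
      split_ifs with h1 h2 h3 h4 <;> try rfl
      all_goals simp_all
      all_goals exact List.count_eq_zero.mpr (by assumption)
    have := ih (insChars t w) (L ++ prefC w) step p
    simpa [List.append_assoc] using this

lemma wf_build (ws : List (List Char)) (t : Trie) (h : WF t) : WF (ws.foldl insChars t) := by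
  induction ws generalizing t with
  | nil => exact h
  | cons w ws ih => exact ih _ (wf_insChars w t h)

-- A's multiset of prefix strings (one inner-loop pass per word)
def prefS (w : String) : List String :=
  (PySem.List.pyRange 1 (PySem.Str.len w + 1) 1).map (fun e => PySem.Str.slice w none (some e))

def LsF (words : List String) : List String := words.flatMap prefS

def LcF (words : List String) : List (List Char) := (words.map String.toList).flatMap prefC

def TF (words : List String) : Trie := (words.map String.toList).foldl insChars Trie.nil

lemma toList_injective : Function.Injective String.toList := fun _ _ h =>
  String.toList_inj.mp h

lemma map_toList_prefS (w : String) : (prefS w).map String.toList = prefC w.toList := by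
  rw [prefS, List.map_map, prefC, PySem.List.pyRange_one]
  rw [show PySem.Str.len w + 1 - 1 = ((w.toList.length : Nat) : Int) by simp]
  rw [Int.toNat_natCast, List.map_map]
  refine List.map_congr_left (fun k hk => ?_)
  simp only [Function.comp_def]
  rw [PySem.Str.toList_slice, PySem.Chars.slice_eq_listSlice,
    PySem.List.slice_to _ (by positivity),
    show ((1 : Int) + (k : Int)).toNat = k + 1 from by omega]

lemma map_toList_LsF (words : List String) : (LsF words).map String.toList = LcF words := by
  rw [LsF, LcF, List.map_flatMap]
  have h : (fun w => (prefS w).map String.toList) = fun w => prefC (String.toList w) :=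
    funext fun w => map_toList_prefS w
  rw [h, List.flatMap_map]

lemma A_eq (words : List String) :
    trie_operations words = ((PySem.Set.ofList (LsF words)).countP
      (fun s => decide (1 < ((LsF words).count s : Int))) : Int) := by
  simp only [trie_operations]
  have hpc : words.foldl (fun d w =>
      (PySem.List.pyRange 1 (PySem.Str.len w + 1) 1).foldl (fun d e =>
        let p := PySem.Str.slice w none (some e)
        if d.contains p then d.insert p (d.getD p 0 + 1) else d.insert p 1) d)
      PySem.Dict.empty = PySem.Dict.counter (LsF words) := by
    have h1 : (fun (d : PySem.Dict String Int) w =>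
        (PySem.List.pyRange 1 (PySem.Str.len w + 1) 1).foldl (fun d e =>
          let p := PySem.Str.slice w none (some e)
          if d.contains p then d.insert p (d.getD p 0 + 1) else d.insert p 1) d)
        = fun d w => (prefS w).foldl (fun d p => d.insert p (d.getD p 0 + 1)) d := by
      funext d w
      rw [prefS, List.foldl_map]
      congr 1
      funext d' e
      show (if d'.contains (PySem.Str.slice w none (some e)) then _ else _) = _
      by_cases h : d'.contains (PySem.Str.slice w none (some e))
      · simp [h]
      · rw [if_neg (by simpa using h),
          PySem.Dict.getD_of_not_contains d' 0 (by simpa using h)]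
        norm_num
    rw [h1, ← List.foldl_flatMap]
    exact PySem.Dict.foldl_insert_getD_add_one_eq_counter _
  rw [hpc, PySem.Dict.keys_counter]
  have h2 : (fun (s : Int) p => if 1 < (PySem.Dict.counter (LsF words)).getD p 0 then s + 1 else s)
      = fun s p => if (fun k => decide (1 < ((LsF words).count k : Int))) p = true then s + 1 else s := by
    funext s p
    rw [PySem.Dict.getD_counter]
    simp
  rw [h2, PySem.List.foldl_count_if]
  simp

lemma B_eq (words : List String) :
    trie_operations_alt words = (((itemsT (TF words)).countP (fun pn => decide (1 < pn.2))) : Int) := by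
  rw [trie_operations_alt, show words.foldl (fun t w => insChars t w.toList) Trie.nil = TF words from
    (List.foldl_map).symm, countShared_eq_countP]

lemma nodeCnt?_TF (words : List String) (p : List Char) :
    nodeCnt? (TF words) p =
      if p ≠ [] ∧ 0 < (LcF words).count p then some (((LcF words).count p : Int)) else none := by
  have := nodeCnt?_build (words.map String.toList) Trie.nil []
    (fun p => by cases p <;> simp [nodeCnt?]) p
  simpa [LcF] using this

lemma itemsT_perm (words : List String) :
    (itemsT (TF words)).Perm ((PySem.Set.ofList (LcF words)).map
      (fun p => (p, ((LcF words).count p : Int)))) := by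
  have hwf : WF (TF words) := wf_build _ _ trivial
  refine (List.perm_ext_iff_of_nodup (List.Nodup.of_map _ (nodup_keys_itemsT hwf))
    ((PySem.Set.nodup_ofList _).map (fun a b hab => congrArg Prod.fst hab)) ).mpr ?_
  rintro ⟨p, n⟩
  rw [mem_itemsT_iff hwf, nodeCnt?_TF]
  constructor
  · intro h
    by_cases hc : p ≠ [] ∧ 0 < (LcF words).count p
    · rw [if_pos hc] at h
      obtain rfl : ((LcF words).count p : Int) = n := Option.some.inj h
      exact List.mem_map.mpr ⟨p, (PySem.Set.mem_ofList _ _).mpr (List.count_pos_iff.mp hc.2), rfl⟩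
    · rw [if_neg hc] at h
      simp at h
  · intro h
    obtain ⟨q, hq, he⟩ := List.mem_map.mp h
    obtain ⟨rfl, rfl⟩ := Prod.ext_iff.mp he
    have hmem : q ∈ LcF words := (PySem.Set.mem_ofList _ _).mp hq
    have hpos : 0 < (LcF words).count q := List.count_pos_iff.mpr hmem
    have hne : q ≠ [] := by
      obtain ⟨w', -, hw'⟩ := List.mem_flatMap.mp hmem
      exact ((mem_prefC _ _).mp hw').1
    rw [if_pos ⟨hne, hpos⟩]

lemma set_perm (words : List String) :
    ((PySem.Set.ofList (LsF words)).map String.toList).Perm (PySem.Set.ofList (LcF words)) := by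
  refine (List.perm_ext_iff_of_nodup ((PySem.Set.nodup_ofList _).map toList_injective)
    (PySem.Set.nodup_ofList _)).mpr (fun x => ?_)
  rw [PySem.Set.mem_ofList, ← map_toList_LsF]
  constructor
  · intro hx
    obtain ⟨s, hs, rfl⟩ := List.mem_map.mp hx
    exact List.mem_map_of_mem ((PySem.Set.mem_ofList _ _).mp hs)
  · intro hx
    obtain ⟨s, hs, rfl⟩ := List.mem_map.mp hx
    exact List.mem_map_of_mem ((PySem.Set.mem_ofList _ _).mpr hs)

-- ===== VERDICT (by name: the statement is the Claim_ definition above) =====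
theorem trie_operations_spec : Claim_equal_trie_operations := by
  intro words _
  show trie_operations words = trie_operations_alt words
  rw [A_eq, B_eq, (itemsT_perm words).countP_eq, List.countP_map,
    ← (set_perm words).countP_eq, List.countP_map]
  congr 1
  refine List.countP_congr (fun s _ => ?_)
  simp only [Function.comp_def]
  rw [← map_toList_LsF, List.count_map_of_injective _ _ toList_injective]
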